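-- pv_equiv track=rewrite | github.com/cibinjohn/DataRepo | code/stitching_cg.py | stitch_predictions_prefer_previous
-- ===== SOURCE A (Python) =====
-- from typing import List, Tuple
--
-- TokenTriple = Tuple[str, str, object]  # (token, label, speaker_id)
--
-- def stitch_predictions_prefer_previous(chunks: List[List[TokenTriple]]) -> List[TokenTriple]:
--     """
--     Stitch predictions from multiple chunks, preferring predictions from the
--     previous chunk for overlapping tokens.
--
--     Args:
--         chunks: List of chunks, where each chunk is a list of (token, label, speaker_id).
--
--     Returns:
--         A single list of (token, label, speaker_id) for the full sequence.
--     """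
--     if not chunks:
--         return []
--
--     # Start stitched result with first chunk (copy to avoid mutating input)
--     stitched: List[TokenTriple] = list(chunks[0])
--
--     def max_overlap_len(a: List[TokenTriple], b: List[TokenTriple]) -> int:
--         """
--         Return the largest k such that the last k tokens of `a` equal the first k tokens of `b`.
--         Matching is done on (token, speaker_id) to be more robust against label differences.
--         """
--         max_k = min(len(a), len(b))
--         # We'll test k from max_k down to 1 to find the largest match quickly
--         for k in range(max_k, 0, -1):
--             # compare last k of a to first k of b
--             tail = a[-k:]
--             head = b[:k]
--             # match by token text and speaker only (ignores labels so previous labels are preferred)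
--             match = True
--             for (t1, _, s1), (t2, _, s2) in zip(tail, head):
--                 if t1 != t2 or s1 != s2:
--                     match = False
--                     break
--             if match:
--                 return k
--         return 0
--
--     # Process remaining chunks
--     for chunk in chunks[1:]:
--         if not chunk:
--             continue
--         k = max_overlap_len(stitched, chunk)
--         # If k > 0, we keep the stitched tail (previous predictions) and append only the non-overlapping part
--         if k > 0:
--             stitched.extend(chunk[k:])  # append remainder
--         else:
--             # No overlap detected: append full chunk
--             stitched.extend(chunk)
--
--     return stitched
-- ===== SOURCE B (Python) =====
-- from typing import List, Tuple
--
-- TokenTriple = Tuple[str, str, object]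
--
-- def stitch_predictions_prefer_previous(chunks: List[List[TokenTriple]]) -> List[TokenTriple]:
--     """KMP-based stitcher: the longest overlap (suffix of stitched == prefix of
--     chunk on (token, speaker) keys) is found with a prefix-function automaton
--     in O(n+m) instead of the quadratic shrinking-window scan."""
--     if not chunks:
--         return []
--     stitched: List[TokenTriple] = list(chunks[0])
--     for chunk in chunks[1:]:
--         if not chunk:
--             continue
--         m = min(len(stitched), len(chunk))
--         pat = [(t, s) for (t, _, s) in chunk[:m]]
--         # prefix function of pat
--         pi = [0] * m
--         j = 0
--         for i in range(1, m):
--             c = pat[i]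
--             while j > 0 and pat[j] != c:
--                 j = pi[j - 1]
--             if pat[j] == c:
--                 j += 1
--             pi[i] = j
--         # run the automaton over the last m tokens of stitched
--         j = 0
--         for (t, _, s) in stitched[len(stitched) - m:]:
--             c = (t, s)
--             while j > 0 and pat[j] != c:
--                 j = pi[j - 1]
--             if j < m and pat[j] == c:
--                 j += 1
--         stitched.extend(chunk[j:])
--     return stitched
-- ===== Notes on version B (the rewrite author's own statement) =====
-- stated objective: alternative
-- what changed: The shrinking-window overlap search (try every k from min(len) down, re-comparing a k-long tail/head slice each time, O(n*m) per chunk boundary) is replaced by a KMP prefix-function automaton that finds the longest suffix-of-stitched = prefix-of-chunk match on (token, speaker) keys in O(n+m) per chunk boundary.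
import Mathlib
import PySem

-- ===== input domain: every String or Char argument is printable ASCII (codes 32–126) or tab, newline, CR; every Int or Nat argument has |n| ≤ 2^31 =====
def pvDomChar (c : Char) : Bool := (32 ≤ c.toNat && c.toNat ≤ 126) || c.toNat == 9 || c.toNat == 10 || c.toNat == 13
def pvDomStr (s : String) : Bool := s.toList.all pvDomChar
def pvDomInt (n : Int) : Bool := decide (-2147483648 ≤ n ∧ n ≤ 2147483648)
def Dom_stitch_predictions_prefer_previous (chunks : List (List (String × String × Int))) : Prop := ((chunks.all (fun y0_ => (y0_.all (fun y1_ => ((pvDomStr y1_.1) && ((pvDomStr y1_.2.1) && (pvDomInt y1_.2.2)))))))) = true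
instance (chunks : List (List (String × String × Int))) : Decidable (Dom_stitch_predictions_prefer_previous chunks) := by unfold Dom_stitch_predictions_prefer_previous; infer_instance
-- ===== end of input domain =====

-- B replaces A's quadratic shrinking-window overlap search by a KMP prefix-function
-- automaton (objective: faster overlap computation, O(n+m) per chunk); return values identical.

-- ===== PORT A =====

-- A's inner `for (t1,_,s1),(t2,_,s2) in zip(tail, head)` loop with early break:
-- compares token text and speaker id, ignores the label.
def pvMatchLoopA : List ((String × String × Int) × (String × String × Int)) → Bool
  | [] => true
  | (x, y) :: rest => if x.1 != y.1 || x.2.2 != y.2.2 then false else pvMatchLoopA rest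

-- A's `max_overlap_len`: k runs down from min(len a, len b) to 1; for each k,
-- tail = a[-k:] and head = b[:k] are zipped and compared.
-- For 1 ≤ k ≤ len a, Python's a[-k:] is exactly a.drop (a.length - k), and b[:k] is b.take k.
def pvMaxOverlapA (a b : List (String × String × Int)) : Nat → Nat
  | 0 => 0
  | k+1 =>
    let tail := a.drop (a.length - (k+1))
    let head := b.take (k+1)
    if pvMatchLoopA (tail.zip head) then k+1 else pvMaxOverlapA a b k

def stitch_predictions_prefer_previous (chunks : List (List (String × String × Int))) : List (String × String × Int) :=
  match chunks with
  | [] => []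
  | c0 :: rest =>
    rest.foldl (fun stitched chunk =>
      if chunk.isEmpty then stitched
      else
        let k := pvMaxOverlapA stitched chunk (min stitched.length chunk.length)
        if k > 0 then stitched ++ chunk.drop k else stitched ++ chunk) c0

-- ===== PORT B =====

-- B's matching key: (token, speaker_id)
def pvKey (x : String × String × Int) : String × Int := (x.1, x.2.2)

-- B's inner `while j > 0 and pat[j] != c: j = pi[j-1]` loop; fuel (= the initial j)
-- only makes the descent structurally terminating, pi[j-1] < j keeps it unreached.
def pvFall (pat : List (String × Int)) (pi : List Nat) (c : String × Int) : Nat → Nat → Nat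
  | _, 0 => 0
  | 0, j => j
  | fuel+1, j+1 => if pat[j+1]? = some c then j + 1 else pvFall pat pi c fuel (pi.getD j 0)

-- one step of the prefix-function build: while-loop, then `if pat[j] == c: j += 1`
def pvStepPi (pat : List (String × Int)) (pi : List Nat) (j : Nat) (c : String × Int) : Nat :=
  let j' := pvFall pat pi c j j
  if pat[j']? = some c then j' + 1 else j'

-- one step of the text scan: while-loop, then `if j < m and pat[j] == c: j += 1`
def pvStepRun (pat : List (String × Int)) (pi : List Nat) (j : Nat) (c : String × Int) : Nat :=
  let j' := pvFall pat pi c j j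
  if j' < pat.length ∧ pat[j']? = some c then j' + 1 else j'

-- B's `pi = [0]*m` + `for i in range(1, m)` loop (pi grows one slot per step, j threaded)
def pvBuildPi (pat : List (String × Int)) : List Nat :=
  match pat with
  | [] => []
  | _ :: tl =>
    (tl.foldl (fun s c => let j := pvStepPi pat s.1 s.2 c; (s.1 ++ [j], j)) ([0], 0)).1

def stitch_predictions_prefer_previous_alt (chunks : List (List (String × String × Int))) : List (String × String × Int) :=
  match chunks with
  | [] => []
  | c0 :: rest =>
    rest.foldl (fun stitched chunk =>
      if chunk.isEmpty then stitched
      else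
        let m := min stitched.length chunk.length
        let pat := (chunk.take m).map pvKey
        let pi := pvBuildPi pat
        let j := ((stitched.drop (stitched.length - m)).map pvKey).foldl
                   (fun j c => pvStepRun pat pi j c) 0
        stitched ++ chunk.drop j) c0

-- ===== PRECONDITION & SPEC =====
def Spec_stitch_predictions_prefer_previous (chunks : List (List (String × String × Int))) (out : List (String × String × Int)) : Prop := out = stitch_predictions_prefer_previous_alt chunks
instance (chunks : List (List (String × String × Int))) (out : List (String × String × Int)) : Decidable (Spec_stitch_predictions_prefer_previous chunks out) := by unfold Spec_stitch_predictions_prefer_previous; infer_instance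

-- ===== CLAIM (what is proved, stated in full; the proofs are below) =====
def Claim_equal_stitch_predictions_prefer_previous : Prop := ∀ (chunks : List (List (String × String × Int))), Dom_stitch_predictions_prefer_previous chunks → Spec_stitch_predictions_prefer_previous chunks (stitch_predictions_prefer_previous chunks)

-- ===== LEMMAS AND PROOFS =====

-- `pvGood p w k`: the first k entries of p are the last k entries of w (meaningful for k ≤ |w|, |p|)
abbrev pvGood (p w : List (String × Int)) (k : Nat) : Prop := w.drop (w.length - k) = p.take k

-- longest k ≤ min |w| |p| with pvGood p w k (the automaton's intended state after reading w)
abbrev pvMB (p w : List (String × Int)) : Nat := Nat.findGreatest (pvGood p w) (min w.length p.length)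

-- longest proper border of p.take n
abbrev pvPB (p : List (String × Int)) (n : Nat) : Nat := Nat.findGreatest (pvGood p (p.take n)) (n - 1)


-- findGreatest either is 0 or satisfies its predicate
lemma pvFG_spec (P : Nat → Prop) [DecidablePred P] (n : Nat) :
    Nat.findGreatest P n = 0 ∨ P (Nat.findGreatest P n) := by
  induction n with
  | zero => exact Or.inl rfl
  | succ n ih =>
    rw [Nat.findGreatest_succ]
    split_ifs with h
    · exact Or.inr h
    · exact ih

-- findGreatest only depends on the predicate below the bound
lemma pvFG_congr (P Q : Nat → Prop) [DecidablePred P] [DecidablePred Q] (n : Nat)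
    (h : ∀ k, k ≤ n → (P k ↔ Q k)) : Nat.findGreatest P n = Nat.findGreatest Q n := by
  induction n with
  | zero => rfl
  | succ n ih =>
    rw [Nat.findGreatest_succ, Nat.findGreatest_succ]
    rw [if_congr (h (n+1) le_rfl) rfl (ih (fun k hk => h k (Nat.le_succ_of_le hk)))]

lemma pvGood_zero (p w : List (String × Int)) : pvGood p w 0 := by
  simp [pvGood]

lemma pvGood_self (p : List (String × Int)) (j : Nat) (hj : j ≤ p.length) :
    pvGood p (p.take j) j := by
  simp [pvGood, List.length_take, Nat.min_eq_left hj]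

lemma pvMB_good (p w : List (String × Int)) : pvGood p w (pvMB p w) := by
  rcases pvFG_spec (pvGood p w) (min w.length p.length) with h | h
  · rw [pvMB, h]; exact pvGood_zero p w
  · exact h

lemma pvPB_good (p : List (String × Int)) (n : Nat) : pvGood p (p.take n) (pvPB p n) := by
  rcases pvFG_spec (pvGood p (p.take n)) (n - 1) with h | h
  · rw [pvPB, h]; exact pvGood_zero p (p.take n)
  · exact h

-- two matching suffixes of w: the shorter is a matching suffix of the longer prefix of p
lemma pvChain1 (p w : List (String × Int)) (j k : Nat) (hk : k ≤ j) (hjw : j ≤ w.length)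
    (hjp : j ≤ p.length) (h1 : pvGood p w k) (h2 : pvGood p w j) : pvGood p (p.take j) k := by
  simp only [pvGood] at *
  rw [List.length_take, Nat.min_eq_left hjp, ← h2, List.drop_drop]
  rw [show w.length - j + (j - k) = w.length - k by omega]
  exact h1

lemma pvChain2 (p w : List (String × Int)) (j k : Nat) (hk : k ≤ j) (hjw : j ≤ w.length)
    (hjp : j ≤ p.length) (h1 : pvGood p (p.take j) k) (h2 : pvGood p w j) : pvGood p w k := by
  simp only [pvGood] at *
  rw [List.length_take, Nat.min_eq_left hjp] at h1
  rw [show w.length - k = w.length - j + (j - k) by omega, ← List.drop_drop, h2]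
  exact h1

-- extending the text by one character
lemma pvAppend_iff (p w : List (String × Int)) (c : String × Int) (k : Nat)
    (hkw : k ≤ w.length) (hkp : k < p.length) :
    pvGood p (w ++ [c]) (k+1) ↔ (pvGood p w k ∧ p[k]? = some c) := by
  simp only [pvGood, List.length_append, List.length_cons, List.length_nil]
  rw [show w.length + 1 - (k + 1) = w.length - k by omega]
  rw [List.drop_append_of_le_length (by omega), List.take_add_one]
  rw [List.getElem?_eq_getElem hkp]
  constructor
  · intro h
    have := List.append_inj' h (by simp)
    refine ⟨this.1, ?_⟩
    simpa using this.2.symm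
  · rintro ⟨h1, h2⟩
    have hpc : p[k] = c := by simpa using h2
    simp [h1, hpc]

-- the fallback while-loop finds the longest matching border followed by c
lemma pvFall_eq (p : List (String × Int)) (pi : List Nat) (c : String × Int) :
    ∀ (fuel j : Nat), j ≤ fuel → j ≤ p.length →
      (∀ t, t < j → pi.getD t 0 = pvPB p (t+1)) →
      pvFall p pi c fuel j =
        Nat.findGreatest (fun k => pvGood p (p.take j) k ∧ p[k]? = some c) j := by
  intro fuel
  induction fuel with
  | zero =>
    intro j hj _ _
    interval_cases j
    rfl
  | succ fuel ih =>
    intro j hj hjp hpi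
    match j with
    | 0 => rfl
    | s+1 =>
      rw [Nat.findGreatest_succ]
      by_cases h : p[s+1]? = some c
      · rw [if_pos ⟨pvGood_self p (s+1) hjp, h⟩]
        simp [pvFall, h]
      · rw [if_neg (fun hP => h hP.2)]
        have hfall : pvFall p pi c (fuel+1) (s+1) = pvFall p pi c fuel (pi.getD s 0) := by
          simp [pvFall, h]
        rw [hfall, hpi s (Nat.lt_succ_self s)]
        have hble : pvPB p (s+1) ≤ s := Nat.findGreatest_le _
        rw [ih (pvPB p (s+1)) (by omega) (by omega)
          (fun t ht => hpi t (by omega))]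
        -- the two findGreatest agree
        apply Nat.le_antisymm
        · rcases pvFG_spec (fun k => pvGood p (p.take (pvPB p (s+1))) k ∧ p[k]? = some c)
            (pvPB p (s+1)) with h0 | ⟨hg, hc⟩
          · rw [h0]; exact Nat.zero_le _
          · have hy := Nat.findGreatest_le (P := fun k => pvGood p (p.take (pvPB p (s+1))) k ∧ p[k]? = some c) (pvPB p (s+1))
            refine Nat.le_findGreatest (by omega) ⟨?_, hc⟩
            exact pvChain2 p (p.take (s+1)) (pvPB p (s+1)) _ hy
              (by rw [List.length_take]; omega) (by omega) hg (pvPB_good p (s+1))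
        · rcases pvFG_spec (fun k => pvGood p (p.take (s+1)) k ∧ p[k]? = some c) s
            with h0 | ⟨hg, hc⟩
          · rw [h0]; exact Nat.zero_le _
          · have hx := Nat.findGreatest_le (P := fun k => pvGood p (p.take (s+1)) k ∧ p[k]? = some c) s
            have hxb : Nat.findGreatest (fun k => pvGood p (p.take (s+1)) k ∧ p[k]? = some c) s ≤ pvPB p (s+1) :=
              Nat.le_findGreatest (by omega) hg
            refine Nat.le_findGreatest hxb ⟨?_, hc⟩
            exact pvChain1 p (p.take (s+1)) (pvPB p (s+1)) _ hxb
              (by rw [List.length_take]; omega) (by omega) hg (pvPB_good p (s+1))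

lemma pvStepPi_eq_run (p : List (String × Int)) (pi : List Nat) (j : Nat) (c : String × Int) :
    pvStepPi p pi j c = pvStepRun p pi j c := by
  simp only [pvStepPi, pvStepRun]
  by_cases h : p[pvFall p pi c j j]? = some c
  · have hlt : pvFall p pi c j j < p.length := by
      rcases List.getElem?_eq_some_iff.mp h with ⟨hl, _⟩
      exact hl
    rw [if_pos h, if_pos ⟨hlt, h⟩]
  · rw [if_neg h, if_neg (fun hP => h hP.2)]

-- the automaton step from the correct state reaches the correct next state
lemma pvStep_eq (p : List (String × Int)) (pi : List Nat) (w : List (String × Int))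
    (c : String × Int)
    (hpi : ∀ t, t < pvMB p w → pi.getD t 0 = pvPB p (t+1))
    (hlt : pvMB p w < p.length) :
    pvStepRun p pi (pvMB p w) c = pvMB p (w ++ [c]) := by
  have hj : pvMB p w ≤ min w.length p.length := Nat.findGreatest_le _
  have hfall := pvFall_eq p pi c (pvMB p w) (pvMB p w) le_rfl (by omega) hpi
  simp only [pvStepRun]
  rw [hfall]
  set j := pvMB p w with hjdef
  set r := Nat.findGreatest (fun k => pvGood p (p.take j) k ∧ p[k]? = some c) j with hrdef
  have hrj : r ≤ j := Nat.findGreatest_le _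
  by_cases hc : p[r]? = some c
  · have hrp : r < p.length := (List.getElem?_eq_some_iff.mp hc).1
    rw [if_pos ⟨hrp, hc⟩]
    have hgoodwr : pvGood p w r := by
      rcases pvFG_spec (fun k => pvGood p (p.take j) k ∧ p[k]? = some c) j with h0 | ⟨hg, _⟩
      · rw [← hrdef] at h0; rw [h0]; exact pvGood_zero p w
      · exact pvChain2 p w j r hrj (by omega) (by omega) hg (pvMB_good p w)
    apply Nat.le_antisymm
    · refine Nat.le_findGreatest (by simp [List.length_append]; omega) ?_
      exact (pvAppend_iff p w c r (by omega) hrp).mpr ⟨hgoodwr, hc⟩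
    · by_cases hy0 : pvMB p (w ++ [c]) = 0
      · omega
      · obtain ⟨k, hk⟩ := Nat.exists_eq_succ_of_ne_zero hy0
        have hyg := pvMB_good p (w ++ [c])
        rw [hk] at hyg
        have hyb : pvMB p (w ++ [c]) ≤ min (w ++ [c]).length p.length := Nat.findGreatest_le _
        rw [hk] at hyb
        simp only [List.length_append, List.length_cons, List.length_nil] at hyb
        obtain ⟨hgk, hck⟩ := (pvAppend_iff p w c k (by omega) (by omega)).mp hyg
        have hkj : k ≤ j := Nat.le_findGreatest (by omega) hgk
        have hgtk : pvGood p (p.take j) k :=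
          pvChain1 p w j k hkj (by omega) (by omega) hgk (pvMB_good p w)
        have : k ≤ r := Nat.le_findGreatest hkj ⟨hgtk, hck⟩
        omega
  · have hr0 : r = 0 := by
      rcases pvFG_spec (fun k => pvGood p (p.take j) k ∧ p[k]? = some c) j with h0 | ⟨_, hcc⟩
      · rw [hrdef]; exact h0
      · exact absurd hcc hc
    rw [if_neg (fun hP => hc hP.2), hr0]
    have hz : pvMB p (w ++ [c]) = 0 := by
      apply Nat.findGreatest_eq_zero_iff.mpr
      intro n hn hnb hgood
      rcases n with _ | k
      · omega
      · simp only [List.length_append, List.length_cons, List.length_nil] at hnb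
        obtain ⟨hgk, hck⟩ := (pvAppend_iff p w c k (by omega) (by omega)).mp hgood
        have hkj : k ≤ j := Nat.le_findGreatest (by omega) hgk
        have hgtk : pvGood p (p.take j) k :=
          pvChain1 p w j k hkj (by omega) (by omega) hgk (pvMB_good p w)
        have hkr : k ≤ r := Nat.le_findGreatest hkj ⟨hgtk, hck⟩
        rw [hr0] at hkr
        have : k = 0 := by omega
        rw [this] at hck
        rw [hr0] at hc
        exact hc hck
    omega

lemma pvMB_nil (p : List (String × Int)) : pvMB p [] = 0 := by
  simp [pvMB]

-- running the automaton over t starting from the correct state for w'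
lemma pvRun_eq (p : List (String × Int)) (pi : List Nat)
    (hpi : ∀ t, t < p.length → pi.getD t 0 = pvPB p (t+1)) :
    ∀ (t w' : List (String × Int)), w'.length + t.length ≤ p.length →
      t.foldl (fun j c => pvStepRun p pi j c) (pvMB p w') = pvMB p (w' ++ t) := by
  intro t
  induction t with
  | nil => intro w' _; simp only [List.foldl_nil, List.append_nil]
  | cons c t' ih =>
    intro w' hlen
    simp only [List.length_cons] at hlen
    have hmb : pvMB p w' ≤ min w'.length p.length := Nat.findGreatest_le _
    rw [List.foldl_cons,
      pvStep_eq p pi w' c (fun t ht => hpi t (by omega)) (by omega),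
      ih (w' ++ [c]) (by simp only [List.length_append, List.length_cons, List.length_nil]; omega)]
    rw [List.append_assoc, List.singleton_append]

lemma pvGood_cons (p w : List (String × Int)) (c : String × Int) (k : Nat) (h : k ≤ w.length) :
    (pvGood p (c :: w) k ↔ pvGood p w k) := by
  simp only [pvGood, List.length_cons]
  rw [show w.length + 1 - k = (w.length - k) + 1 by omega, List.drop_succ_cons]

-- the prefix function value is the automaton state over the pattern's own tail
lemma pvPB_eq_MB_tail (c0 : String × Int) (tl : List (String × Int)) (i : Nat)
    (h : i ≤ tl.length) :
    pvPB (c0 :: tl) (i+1) = pvMB (c0 :: tl) (tl.take i) := by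
  rw [pvPB, pvMB]
  rw [show min (tl.take i).length (c0 :: tl).length = i from by
    simp only [List.length_take, List.length_cons]; omega]
  rw [show i + 1 - 1 = i from rfl]
  apply pvFG_congr
  intro k hk
  rw [List.take_succ_cons]
  exact pvGood_cons (c0 :: tl) (tl.take i) c0 k (by simp only [List.length_take]; omega)

lemma pvGetD_map_range (f : Nat → Nat) (n t : Nat) (h : t < n) :
    ((List.range n).map f).getD t 0 = f t := by
  rw [List.getD_eq_getElem?_getD, List.getElem?_map, List.getElem?_range h]
  rfl

-- invariant of the prefix-function build loop
lemma pvBuild_inv (c0 : String × Int) (tl : List (String × Int)) :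
    ∀ i, i ≤ tl.length →
      ((tl.take i).foldl (fun s c => let j := pvStepPi (c0::tl) s.1 s.2 c; (s.1 ++ [j], j)) ([0], 0)) =
        ((List.range (i+1)).map (fun n => pvPB (c0::tl) (n+1)), pvMB (c0::tl) (tl.take i)) := by
  intro i
  induction i with
  | zero =>
    intro _
    simp [List.range_one]
    constructor
    · rfl
    · rw [pvMB_nil]
  | succ i ih =>
    intro h
    have hi : i < tl.length := by omega
    rw [show tl.take (i+1) = tl.take i ++ [tl[i]] by
      rw [List.take_add_one, List.getElem?_eq_getElem hi]; rfl]
    rw [List.foldl_append, ih (by omega), List.foldl_cons, List.foldl_nil]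
    simp only
    have hmble : pvMB (c0::tl) (tl.take i) ≤ min (tl.take i).length (c0::tl).length :=
      Nat.findGreatest_le _
    have hlti : (tl.take i).length = i := by rw [List.length_take]; omega
    have hj' : pvStepPi (c0::tl) ((List.range (i+1)).map (fun n => pvPB (c0::tl) (n+1)))
        (pvMB (c0::tl) (tl.take i)) tl[i] = pvMB (c0::tl) (tl.take i ++ [tl[i]]) := by
      rw [pvStepPi_eq_run]
      apply pvStep_eq
      · intro t ht
        exact pvGetD_map_range _ _ _ (by omega)
      · simp only [List.length_cons]; omega
    rw [hj']
    simp only [Prod.mk.injEq]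
    refine ⟨?_, by trivial⟩
    have hpb : pvPB (c0 :: tl) (i + 1 + 1) = pvMB (c0 :: tl) (tl.take i ++ [tl[i]]) := by
      rw [pvPB_eq_MB_tail c0 tl (i+1) (by omega),
        show tl.take (i+1) = tl.take i ++ [tl[i]] by
          rw [List.take_add_one, List.getElem?_eq_getElem hi]; rfl]
    rw [← hpb]
    simp [List.range_succ]

lemma pvBuildPi_spec (c0 : String × Int) (tl : List (String × Int)) :
    ∀ t, t < (c0 :: tl).length → (pvBuildPi (c0 :: tl)).getD t 0 = pvPB (c0 :: tl) (t+1) := by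
  intro t ht
  have h := pvBuild_inv c0 tl tl.length le_rfl
  rw [List.take_length] at h
  show (tl.foldl (fun s c => let j := pvStepPi (c0::tl) s.1 s.2 c; (s.1 ++ [j], j)) ([0], 0)).1.getD t 0 = _
  rw [h]
  simp only [List.length_cons] at ht
  exact pvGetD_map_range _ _ _ (by omega)

-- ===== A-side characterisation =====

lemma pvMatchLoop_iff : ∀ (xs ys : List (String × String × Int)), xs.length = ys.length →
    (pvMatchLoopA (xs.zip ys) = true ↔ xs.map pvKey = ys.map pvKey) := by
  intro xs
  induction xs with
  | nil =>
    intro ys h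
    cases ys with
    | nil => simp [pvMatchLoopA]
    | cons y ys => simp at h
  | cons x xs ih =>
    intro ys h
    cases ys with
    | nil => simp at h
    | cons y ys =>
      simp only [List.length_cons] at h
      simp only [List.zip_cons_cons, List.map_cons]
      by_cases h1 : x.1 = y.1 ∧ x.2.2 = y.2.2
      · have : pvMatchLoopA ((x, y) :: xs.zip ys) = pvMatchLoopA (xs.zip ys) := by
          simp [pvMatchLoopA, h1.1, h1.2]
        rw [this, ih ys (by omega)]
        constructor
        · intro he; rw [he]; congr 1; simp [pvKey, h1.1, h1.2]
        · intro he; exact (List.cons_eq_cons.mp he).2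
      · have : pvMatchLoopA ((x, y) :: xs.zip ys) = false := by
          simp only [pvMatchLoopA]
          rw [if_pos]
          rcases not_and_or.mp h1 with h2 | h2 <;> simp [h2]
        rw [this]
        simp only [Bool.false_eq_true, false_iff]
        intro he
        obtain ⟨hk, _⟩ := List.cons_eq_cons.mp he
        simp only [pvKey, Prod.mk.injEq] at hk
        exact h1 hk

lemma pvGoodAB_iff (a b : List (String × String × Int)) (k : Nat)
    (hk : k ≤ min a.length b.length) :
    ((a.drop (a.length - k)).map pvKey = (b.take k).map pvKey ↔
      pvGood ((b.take (min a.length b.length)).map pvKey)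
             ((a.drop (a.length - min a.length b.length)).map pvKey) k) := by
  simp only [pvGood]
  rw [List.length_map, List.length_drop]
  rw [← List.map_drop, List.drop_drop, ← List.map_take, List.take_take]
  rw [show a.length - min a.length b.length + (a.length - (a.length - min a.length b.length) - k) = a.length - k from by omega]
  rw [show min k (min a.length b.length) = k from by omega]

lemma pvMaxOverlapA_eq (a b : List (String × String × Int)) :
    ∀ k, k ≤ min a.length b.length →
      pvMaxOverlapA a b k =
        Nat.findGreatest (pvGood ((b.take (min a.length b.length)).map pvKey)
          ((a.drop (a.length - min a.length b.length)).map pvKey)) k := by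
  intro k
  induction k with
  | zero => intro _; rfl
  | succ k ih =>
    intro hk
    have hlen1 : (a.drop (a.length - (k+1))).length = k + 1 := by
      rw [List.length_drop]; omega
    have hlen2 : (b.take (k+1)).length = k + 1 := by
      rw [List.length_take]; omega
    rw [Nat.findGreatest_succ]
    simp only [pvMaxOverlapA]
    by_cases hcond : (a.drop (a.length - (k+1))).map pvKey = (b.take (k+1)).map pvKey
    · have hb : pvMatchLoopA ((a.drop (a.length - (k+1))).zip (b.take (k+1))) = true :=
        (pvMatchLoop_iff _ _ (by omega)).mpr hcond
      rw [if_pos hb, if_pos ((pvGoodAB_iff a b (k+1) hk).mp hcond)]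
    · have hb : ¬ (pvMatchLoopA ((a.drop (a.length - (k+1))).zip (b.take (k+1))) = true) :=
        fun hx => hcond ((pvMatchLoop_iff _ _ (by omega)).mp hx)
      rw [if_neg hb, if_neg (fun hg => hcond ((pvGoodAB_iff a b (k+1) hk).mpr hg))]
      exact ih (by omega)

-- ===== the per-chunk overlap lengths agree =====

-- the automaton over the whole text computes the longest overlap
lemma pvKMP_eq_MB (p w : List (String × Int)) (h : w.length = p.length) :
    w.foldl (fun j c => pvStepRun p (pvBuildPi p) j c) 0 = pvMB p w := by
  cases hp : p with
  | nil =>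
    have : w = [] := by
      rw [← List.length_eq_zero_iff, h, hp]
      rfl
    rw [this]
    rfl
  | cons c0 tl =>
    have hpi := pvBuildPi_spec c0 tl
    have hrun := pvRun_eq (c0 :: tl) (pvBuildPi (c0 :: tl)) hpi w []
      (by rw [← hp, ← h]; simp)
    rw [pvMB_nil, List.nil_append] at hrun
    exact hrun

lemma pvOverlap_eq (st chunk : List (String × String × Int)) :
    pvMaxOverlapA st chunk (min st.length chunk.length) =
      ((st.drop (st.length - min st.length chunk.length)).map pvKey).foldl
        (fun j c => pvStepRun ((chunk.take (min st.length chunk.length)).map pvKey)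
          (pvBuildPi ((chunk.take (min st.length chunk.length)).map pvKey)) j c) 0 := by
  have hpl : ((chunk.take (min st.length chunk.length)).map pvKey).length
      = min st.length chunk.length := by
    rw [List.length_map, List.length_take]
    omega
  have hwl : ((st.drop (st.length - min st.length chunk.length)).map pvKey).length
      = min st.length chunk.length := by
    rw [List.length_map, List.length_drop]
    omega
  rw [pvMaxOverlapA_eq st chunk (min st.length chunk.length) le_rfl,
    pvKMP_eq_MB _ _ (by rw [hpl, hwl]), pvMB,
    show min ((st.drop (st.length - min st.length chunk.length)).map pvKey).length
        ((chunk.take (min st.length chunk.length)).map pvKey).length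
      = min st.length chunk.length from by rw [hpl, hwl, Nat.min_self]]

-- ===== VERDICT (by name: the statement is the Claim_ definition above) =====
theorem stitch_predictions_prefer_previous_spec : Claim_equal_stitch_predictions_prefer_previous := by
  intro chunks _
  unfold Spec_stitch_predictions_prefer_previous
  unfold stitch_predictions_prefer_previous stitch_predictions_prefer_previous_alt
  cases chunks with
  | nil => rfl
  | cons c0 rest =>
    apply List.foldl_ext
    intro st chunk _
    by_cases he : chunk.isEmpty
    · rw [if_pos he, if_pos he]
    · rw [if_neg he, if_neg he]
      simp only
      rw [← pvOverlap_eq st chunk]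
      by_cases hk : pvMaxOverlapA st chunk (min st.length chunk.length) > 0
      · rw [if_pos hk]
      · rw [if_neg hk]
        have : pvMaxOverlapA st chunk (min st.length chunk.length) = 0 := by omega
        rw [this, List.drop_zero]
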